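-- pv_equiv track=rewrite | github.com/Open-xFusion/Server_Plugin_Puppet | src/files/REST-Linux/scripts/set_sys_boot.py | _checkbootsequence
-- ===== SOURCE A (Python) =====
-- def _checkbootsequence(sequence):
--     """
--     #=======================================================================
--     #   @Description:  set boot sequence
--     #   @Method:  _setbootsequence
--     #   @Param:
--     #   @Return:
--     #   @Date:
--     #=========================================================================
--     """
--
--     if len(sequence) != 4:
--         return False
--
--     cddvd = False
--     hdd = False
--     pxe = False
--     other = False
--
--     for i in range(0, 4):
--         if sequence[i] == 'Cd':
--             cddvd = True
--         if sequence[i] == 'Hdd':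
--             hdd = True
--         if sequence[i] == 'Pxe':
--             pxe = True
--         if sequence[i] == 'Others':
--             other = True
--
--     if cddvd is not True \
--             or hdd is not True \
--             or pxe is not True \
--             or other is not True:
--         return False
--
--     return True
-- ===== SOURCE B (Python) =====
-- def _checkbootsequence(sequence):
--     return sorted(sequence) == ['Cd', 'Hdd', 'Others', 'Pxe']
-- ===== Notes on version B (the rewrite author's own statement) =====
-- stated objective: simpler
-- what changed: Replaces the length check, the four boolean flags and the index loop with a single permutation test: sort the sequence and compare it to the canonical sorted list of the four required boot values.
import Mathlib
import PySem

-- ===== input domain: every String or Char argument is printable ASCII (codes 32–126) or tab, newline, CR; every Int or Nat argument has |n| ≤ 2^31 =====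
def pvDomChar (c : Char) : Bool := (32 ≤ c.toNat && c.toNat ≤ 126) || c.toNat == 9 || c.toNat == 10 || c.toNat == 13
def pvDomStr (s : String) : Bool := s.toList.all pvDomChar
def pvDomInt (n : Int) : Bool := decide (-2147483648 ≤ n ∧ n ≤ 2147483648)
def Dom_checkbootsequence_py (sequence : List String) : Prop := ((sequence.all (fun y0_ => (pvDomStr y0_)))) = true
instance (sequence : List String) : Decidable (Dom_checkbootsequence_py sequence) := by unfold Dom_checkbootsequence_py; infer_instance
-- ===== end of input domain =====

-- ===== PORT A =====
-- B replaces the flag loop with a single sort: valid iff sorted(sequence) is the canonical list (objective: simpler).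
def checkbootsequence_py (sequence : List String) : Bool :=
  if sequence.length ≠ 4 then false
  else
    let st := (PySem.List.pyRange 0 4 1).foldl
      (fun (st : Bool × Bool × Bool × Bool) i =>
        let e := PySem.List.pyGetD sequence i ""
        let cddvd := if e = "Cd" then true else st.1
        let hdd := if e = "Hdd" then true else st.2.1
        let pxe := if e = "Pxe" then true else st.2.2.1
        let other := if e = "Others" then true else st.2.2.2
        (cddvd, hdd, pxe, other))
      (false, false, false, false)
    if st.1 ≠ true ∨ st.2.1 ≠ true ∨ st.2.2.1 ≠ true ∨ st.2.2.2 ≠ true then false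
    else true

-- ===== PORT B =====
def checkbootsequence_py_alt (sequence : List String) : Bool :=
  PySem.List.sorted sequence (fun x => x) false == ["Cd", "Hdd", "Others", "Pxe"]

-- ===== PRECONDITION & SPEC =====
def Spec_checkbootsequence_py (sequence : List String) (out : Bool) : Prop := out = checkbootsequence_py_alt sequence
instance (sequence : List String) (out : Bool) : Decidable (Spec_checkbootsequence_py sequence out) := by unfold Spec_checkbootsequence_py; infer_instance

-- ===== CLAIM (what is proved, stated in full; the proofs are below) =====
def Claim_equal_checkbootsequence_py : Prop := ∀ (sequence : List String), Dom_checkbootsequence_py sequence → Spec_checkbootsequence_py sequence (checkbootsequence_py sequence)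

-- ===== LEMMAS AND PROOFS =====

-- An if-chain of four equality tests (as left by A's unrolled flag loop) is membership in the 4-list.
theorem flag4 (p a b c d : String) :
    ((if d = p then true else if c = p then true else if b = p then true
      else if a = p then true else false) = true) ↔ p ∈ [a, b, c, d] := by
  by_cases h1 : a = p <;> by_cases h2 : b = p <;> by_cases h3 : c = p <;> by_cases h4 : d = p <;>
    simp_all
  exact ⟨fun h => h1 h.symm, fun h => h2 h.symm, fun h => h3 h.symm, fun h => h4 h.symm⟩

-- A returns true on a 4-list iff it contains the four required values.
theorem portA_char (a b c d : String) :
    checkbootsequence_py [a, b, c, d] = true ↔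
      ("Cd" ∈ [a, b, c, d] ∧ "Hdd" ∈ [a, b, c, d] ∧ "Pxe" ∈ [a, b, c, d] ∧
        "Others" ∈ [a, b, c, d]) := by
  have hr : PySem.List.pyRange 0 4 1 = [0, 1, 2, 3] := by decide
  have g0 : PySem.List.pyGetD [a, b, c, d] 0 "" = a := rfl
  have g1 : PySem.List.pyGetD [a, b, c, d] 1 "" = b := rfl
  have g2 : PySem.List.pyGetD [a, b, c, d] 2 "" = c := rfl
  have g3 : PySem.List.pyGetD [a, b, c, d] 3 "" = d := rfl
  simp only [checkbootsequence_py, hr, List.foldl, g0, g1, g2, g3, ne_eq, flag4]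
  norm_num

-- B returns true iff the sequence is a permutation of the four required values.
theorem portB_char (sequence : List String) :
    checkbootsequence_py_alt sequence = true ↔
      sequence.Perm ["Cd", "Hdd", "Others", "Pxe"] := by
  have ht : PySem.List.sorted ["Cd", "Hdd", "Others", "Pxe"] (fun x => x) false
      = ["Cd", "Hdd", "Others", "Pxe"] := by
    apply PySem.List.sorted_eq_self_of_pairwise
    simp only [List.pairwise_cons, List.mem_cons]
    norm_num [String.le_iff_toList_le]
    refine ⟨⟨?_, ?_, ?_⟩, ⟨?_, ?_⟩, ?_⟩ <;> decide
  rw [checkbootsequence_py_alt, beq_iff_eq, ← ht,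
    PySem.List.sorted_id_eq_sorted_id_iff_perm, ht]

-- Pigeonhole: a 4-list containing the four distinct required values is a permutation of them.
theorem perm_of_mem4 (sequence : List String) (hl : sequence.length = 4)
    (h1 : "Cd" ∈ sequence) (h2 : "Hdd" ∈ sequence) (h3 : "Pxe" ∈ sequence)
    (h4 : "Others" ∈ sequence) :
    sequence.Perm ["Cd", "Hdd", "Others", "Pxe"] := by
  have hnd : (["Cd", "Hdd", "Others", "Pxe"] : List String).Nodup := by decide
  have hsub : (["Cd", "Hdd", "Others", "Pxe"] : List String) ⊆ sequence := by
    intro x hx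
    simp only [List.mem_cons, List.not_mem_nil, or_false] at hx
    rcases hx with h | h | h | h <;> subst h <;> assumption
  have hsp : List.Subperm (["Cd", "Hdd", "Others", "Pxe"] : List String) sequence :=
    List.subperm_of_subset hnd hsub
  exact (hsp.perm_of_length_le (by simp [hl])).symm

-- A is false on any list whose length is not 4.
theorem portA_ne4 (sequence : List String) (h : sequence.length ≠ 4) :
    checkbootsequence_py sequence = false := by
  simp [checkbootsequence_py, h]

-- ===== VERDICT (by name: the statement is the Claim_ definition above) =====
theorem checkbootsequence_py_spec : Claim_equal_checkbootsequence_py := by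
  intro sequence _
  unfold Spec_checkbootsequence_py
  by_cases hl : sequence.length = 4
  · match sequence, hl with
    | [a, b, c, d], _ =>
      rw [Bool.eq_iff_iff, portA_char, portB_char]
      constructor
      · rintro ⟨h1, h2, h3, h4⟩
        exact perm_of_mem4 _ rfl h1 h2 h3 h4
      · intro hp
        refine ⟨hp.mem_iff.mpr ?_, hp.mem_iff.mpr ?_, hp.mem_iff.mpr ?_, hp.mem_iff.mpr ?_⟩ <;> decide
  · rw [portA_ne4 sequence hl]
    cases h : checkbootsequence_py_alt sequence
    · rfl
    · exact absurd (by simpa using ((portB_char sequence).mp h).length_eq) hl
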